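-- pv_equiv track=rewrite | github.com/Jkavadias21/Steamatic-Gipp-Tools | air_scrubber_functions.py | findScrubberCombos
-- ===== SOURCE A (Python) =====
-- def findScrubberCombos(scrubbersCfms, cfmTar):
--     def backtrack(start, path, total):
--         if total <= cfmTar:
--             result.append(path)
--         for i in range(start, len(scrubbersCfms)):
--             if total + scrubbersCfms[i] <= cfmTar:
--                 backtrack(i, path + [scrubbersCfms[i]], total + scrubbersCfms[i])
--
--     result = []
--     scrubbersCfms.sort()  # Ensure scrubbersCfms is sorted
--     backtrack(0, [], 0)
--     return result
-- ===== SOURCE B (Python) =====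
-- def findScrubberCombos(scrubbersCfms, cfmTar):
--     # Same in-place sort as the original (the caller observes the sorted list).
--     scrubbersCfms.sort()
--
--     # Pure structural recursion on list suffixes: a node emits its path (when the
--     # running total fits) and then collects, left to right, the subtrees obtained
--     # by appending each element of the remaining suffix (repetition allowed by
--     # keeping the element at the head of the child's suffix). No indices, no
--     # shared mutable result list.
--     def node(suffix, path, total):
--         out = [path] if total <= cfmTar else []
--         rest = suffix
--         while rest:
--             x = rest[0]
--             if total + x <= cfmTar:
--                 out = out + node(rest, path + [x], total + x)
--             rest = rest[1:]
--         return out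
--
--     return node(scrubbersCfms, [], 0)
-- ===== Notes on version B (the rewrite author's own statement) =====
-- stated objective: alternative
-- what changed: Replaces the index-range backtracking that appends into a shared mutable result with a pure structural recursion on list suffixes that returns and concatenates the sub-results (no indices, no shared state); the in-place sort is kept.
import Mathlib
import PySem

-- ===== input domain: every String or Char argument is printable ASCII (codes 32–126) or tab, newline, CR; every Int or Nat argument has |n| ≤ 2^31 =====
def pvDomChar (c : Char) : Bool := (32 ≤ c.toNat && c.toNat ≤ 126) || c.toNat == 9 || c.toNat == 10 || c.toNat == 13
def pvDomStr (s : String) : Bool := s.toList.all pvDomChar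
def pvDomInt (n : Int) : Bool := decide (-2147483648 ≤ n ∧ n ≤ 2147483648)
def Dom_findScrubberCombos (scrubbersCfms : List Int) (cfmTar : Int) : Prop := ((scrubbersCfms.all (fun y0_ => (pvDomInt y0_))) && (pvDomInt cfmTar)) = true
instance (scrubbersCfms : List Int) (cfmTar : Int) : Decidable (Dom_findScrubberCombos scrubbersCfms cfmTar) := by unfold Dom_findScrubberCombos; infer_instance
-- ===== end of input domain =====

-- B replaces A's index-range backtracking into a shared mutable result by a pure structural
-- recursion on list suffixes (objective: alternative decomposition, same cost). Both programs
-- sort the argument list in place; the equivalence proved here is about the return value.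
-- Both ports guard the (Python-unbounded) recursion with the same fuel cfmTar.toNat + 1,
-- which is sufficient on every input admitted by Pre_ (each recursive call raises the total
-- by a positive amount while it stays ≤ cfmTar).

-- ===== PORT A =====
-- Literal port of A's backtrack: emit path if total ≤ cfmTar, then loop i over
-- range(start, len) recursing with the same i.  Indices produced by range' start (len-start)
-- are always in range, so getD i 0 is exact for scrubbersCfms[i].
def btA (S : List Int) (tar : Int) : Nat → Nat → List Int → Int → List (List Int)
  | 0, _, _, _ => []
  | f+1, start, path, total =>
    (if total ≤ tar then [path] else []) ++
    (List.range' start (S.length - start)).foldl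
      (fun acc i =>
        if total + S.getD i 0 ≤ tar then
          acc ++ btA S tar f i (path ++ [S.getD i 0]) (total + S.getD i 0)
        else acc) []

def findScrubberCombos (scrubbersCfms : List Int) (cfmTar : Int) : List (List Int) :=
  let S := PySem.List.sorted scrubbersCfms (fun x => x) false
  btA S cfmTar (cfmTar.toNat + 1) 0 [] 0

-- ===== PORT B =====
-- Port of B's node: emit path when it fits, then walk the suffix (the while loop over rest,
-- transliterated as the structural helper kidsB with the accumulator out), recursing with the
-- current suffix kept at the child's head.
mutual
  def nodeB (tar : Int) : Nat → List Int → List Int → Int → List (List Int)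
    | 0, _, _, _ => []
    | f+1, suffix, path, total =>
      kidsB tar f suffix path total (if total ≤ tar then [path] else [])
  termination_by f _ _ _ => (f, 0)
  def kidsB (tar : Int) : Nat → List Int → List Int → Int → List (List Int) → List (List Int)
    | _, [], _, _, out => out
    | f, x :: rest, path, total, out =>
      kidsB tar f rest path total
        (out ++ (if total + x ≤ tar then nodeB tar f (x :: rest) (path ++ [x]) (total + x) else []))
  termination_by f s _ _ _ => (f, s.length + 1)
end

def findScrubberCombos_alt (scrubbersCfms : List Int) (cfmTar : Int) : List (List Int) :=
  let S := PySem.List.sorted scrubbersCfms (fun x => x) false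
  nodeB cfmTar (cfmTar.toNat + 1) S [] 0

-- ===== PRECONDITION & SPEC =====
-- Pre_ excludes exactly the inputs holding a nonpositive CFM value x with x ≤ cfmTar:
-- there A's backtrack re-enters itself forever with the same index (Python raises
-- RecursionError), so A returns on no excluded input.
def Pre_findScrubberCombos (scrubbersCfms : List Int) (cfmTar : Int) : Prop :=
  ∀ x ∈ scrubbersCfms, x ≤ 0 → cfmTar < x
instance (scrubbersCfms : List Int) (cfmTar : Int) : Decidable (Pre_findScrubberCombos scrubbersCfms cfmTar) := by unfold Pre_findScrubberCombos; infer_instance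
def pvWitness_findScrubberCombos : List Int × Int := ([3, 1, 2], 4)
def Spec_findScrubberCombos (scrubbersCfms : List Int) (cfmTar : Int) (out : List (List Int)) : Prop := out = findScrubberCombos_alt scrubbersCfms cfmTar
instance (scrubbersCfms : List Int) (cfmTar : Int) (out : List (List Int)) : Decidable (Spec_findScrubberCombos scrubbersCfms cfmTar out) := by unfold Spec_findScrubberCombos; infer_instance

-- ===== CLAIM (what is proved, stated in full; the proofs are below) =====
def Claim_equal_findScrubberCombos : Prop := ∀ (scrubbersCfms : List Int) (cfmTar : Int), Dom_findScrubberCombos scrubbersCfms cfmTar → Pre_findScrubberCombos scrubbersCfms cfmTar → Spec_findScrubberCombos scrubbersCfms cfmTar (findScrubberCombos scrubbersCfms cfmTar)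

-- ===== LEMMAS AND PROOFS =====

-- kidsB with an accumulator is the accumulator followed by kidsB from [].
theorem kidsB_acc (tar : Int) (f : Nat) :
    ∀ (s path : List Int) (total : Int) (out : List (List Int)),
      kidsB tar f s path total out = out ++ kidsB tar f s path total [] := by
  intro s
  induction s with
  | nil => intro path total out; simp [kidsB]
  | cons x rest ih =>
    intro path total out
    rw [kidsB, kidsB, ih, ih (out := [] ++ _)]
    simp

-- A's foldl loop, flattened.
theorem foldl_if_append {α β : Type} (p : α → Prop) [DecidablePred p] (h : α → List β) :
    ∀ (l : List α) (a : List β),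
      l.foldl (fun acc i => if p i then acc ++ h i else acc) a
        = a ++ l.flatMap (fun i => if p i then h i else []) := by
  intro l
  induction l with
  | nil => intro a; simp
  | cons x xs ih =>
    intro a
    simp only [List.foldl_cons, List.flatMap_cons, ih]
    by_cases hp : p x <;> simp [hp]

-- Core equivalence: A's index recursion from start equals B's suffix recursion on drop start.
theorem btA_eq_nodeB (S : List Int) (tar : Int) :
    ∀ (f : Nat) (start : Nat) (path : List Int) (total : Int),
      btA S tar f start path total = nodeB tar f (S.drop start) path total := by
  intro f
  induction f with
  | zero => intro start path total; simp [btA, nodeB]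
  | succ f ih =>
    intro start path total
    rw [btA, nodeB, kidsB_acc]
    congr 1
    rw [foldl_if_append (fun i => total + S.getD i 0 ≤ tar)
        (fun i => btA S tar f i (path ++ [S.getD i 0]) (total + S.getD i 0))]
    simp only [List.nil_append]
    -- induction on the remaining length n = S.length - start
    have main : ∀ (n start : Nat), n = S.length - start → ∀ (path : List Int) (total : Int),
        (List.range' start n).flatMap
            (fun i => if total + S.getD i 0 ≤ tar then
                btA S tar f i (path ++ [S.getD i 0]) (total + S.getD i 0) else [])
          = kidsB tar f (S.drop start) path total [] := by
      intro n
      induction n with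
      | zero =>
        intro start hn path total
        have : S.length ≤ start := by omega
        simp [List.drop_eq_nil_of_le this, kidsB]
      | succ n ihn =>
        intro start hn path total
        have hlt : start < S.length := by omega
        have hdrop : S.drop start = S[start] :: S.drop (start + 1) :=
          (List.getElem_cons_drop hlt).symm
        have hgetD : S.getD start 0 = S[start] := List.getD_eq_getElem S 0 hlt
        rw [List.range'_succ]
        simp only [List.flatMap_cons]
        rw [hdrop]
        simp only [kidsB]
        rw [kidsB_acc, List.nil_append, hgetD, ihn (start + 1) (by omega) path total]
        congr 1
        by_cases hc : total + S[start] ≤ tar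
        · rw [if_pos hc, if_pos hc, ih, hdrop]
        · rw [if_neg hc, if_neg hc]
    exact main (S.length - start) start rfl path total

-- ===== VERDICT (by name: the statement is the Claim_ definition above) =====
theorem findScrubberCombos_spec : Claim_equal_findScrubberCombos := by
  intro scrubbersCfms cfmTar _ _
  unfold Spec_findScrubberCombos findScrubberCombos findScrubberCombos_alt
  simpa using btA_eq_nodeB (PySem.List.sorted scrubbersCfms (fun x => x) false) cfmTar
    (cfmTar.toNat + 1) 0 [] 0
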